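-- pv_equiv track=rewrite | github.com/ErikWe/aoc-24 | src/days/d16/main.py | get_states_on_shortest_paths_to_state
-- ===== SOURCE A (Python) =====
-- def get_states_on_shortest_paths_to_state(end_state, came_from):
--     states = set([end_state])
--
--     if end_state not in came_from:
--         return states
--
--     for state in came_from[end_state]:
--         if state not in states:
--             states.update(get_states_on_shortest_paths_to_state(state, came_from))
--
--     return states
-- ===== SOURCE B (Python) =====
-- def get_states_on_shortest_paths_to_state(end_state, came_from):
--     # Iterative DFS over the reverse edges with an explicit stack and ONE
--     # shared visited set: every state is expanded at most once, instead of
--     # A's fresh-set-per-call recursion that re-explores shared substructure.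
--     # (Predecessors are pushed in reverse so they are expanded left-to-right.)
--     visited = set()
--     stack = [end_state]
--     while stack:
--         state = stack.pop()
--         if state in visited:
--             continue
--         visited.add(state)
--         stack.extend(reversed(came_from.get(state, ())))
--     return visited
-- ===== Notes on version B (the rewrite author's own statement) =====
-- stated objective: alternative
-- what changed: B replaces A's fresh-set-per-call recursion (which merges per-call result sets with set.update and re-explores shared substructure) by an iterative explicit-stack DFS threading one shared visited set, so every state is expanded at most once.
-- crash fix: On inputs whose came_from graph has a cycle of length >= 2 reachable from end_state, A raises RecursionError while B returns the set of reachable states. — e.g. on get_states_on_shortest_paths_to_state([0], [([0], [[1]]), ([1], [[0]])]): A raises RecursionError, B returns [[0], [1]]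
import Mathlib
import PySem

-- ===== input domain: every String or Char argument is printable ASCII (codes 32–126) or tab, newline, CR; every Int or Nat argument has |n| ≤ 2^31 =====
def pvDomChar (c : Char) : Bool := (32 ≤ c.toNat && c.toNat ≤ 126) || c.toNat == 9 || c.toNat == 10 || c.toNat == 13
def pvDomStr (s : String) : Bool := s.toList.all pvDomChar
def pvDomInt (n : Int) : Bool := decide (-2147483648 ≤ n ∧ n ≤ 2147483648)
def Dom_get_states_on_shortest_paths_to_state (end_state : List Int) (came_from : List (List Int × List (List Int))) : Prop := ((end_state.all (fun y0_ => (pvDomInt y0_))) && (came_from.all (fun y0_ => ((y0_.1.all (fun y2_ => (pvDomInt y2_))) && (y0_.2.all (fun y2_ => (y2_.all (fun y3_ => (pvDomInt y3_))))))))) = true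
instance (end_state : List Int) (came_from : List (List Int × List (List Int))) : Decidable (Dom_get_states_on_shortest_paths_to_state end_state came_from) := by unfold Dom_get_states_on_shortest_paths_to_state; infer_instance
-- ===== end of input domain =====

-- B replaces A's fresh-set-per-call recursion by an iterative explicit-stack DFS with one shared
-- visited set (each state expanded at most once); equivalence is proved on Pre_ (no cycle of
-- length ≥ 2 of came_from reachable from end_state — exactly where A terminates).

-- ===== PORT A =====
-- Recursion is fuel-bounded: on inputs satisfying Pre_ the call depth never exceeds
-- came_from.length + 1 (proved below), so the fuel-0 branch is never taken there.
def goA (cf : PySem.Dict (List Int) (List (List Int))) : Nat → List Int → PySem.Set (List Int)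
  | 0, s => PySem.Set.ofList [s]
  | fuel+1, s =>
    -- states = set([end_state]); if end_state not in came_from: return states
    match cf.get? s with
    | none => PySem.Set.ofList [s]
    | some prevs =>
      -- for state in came_from[end_state]: if state not in states: states.update(recurse)
      prevs.foldl (fun states p =>
        if states.contains p then states
        else PySem.Set.update states (goA cf fuel p)) (PySem.Set.ofList [s])

def get_states_on_shortest_paths_to_state (end_state : List Int) (came_from : List (List Int × List (List Int))) : List (List Int) :=
  goA (PySem.Dict.mk came_from) (came_from.length + 1) end_state

-- ===== PORT B =====
-- while stack: state = stack.pop(); if state in visited: continue;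
--              visited.add(state); stack.extend(reversed(came_from.get(state, ())))
-- The Lean stack keeps the TOP at the head (Python's list keeps it at the end), so Python's
-- 'extend(reversed(prevs))' is 'prevs ++ rest' here.  The while loop is fuel-bounded: each
-- iteration pops one entry, and at most 1 + (total length of all predecessor lists) entries
-- are ever pushed (proved below), so the fuel-0 branch is never taken.
def goB (cf : PySem.Dict (List Int) (List (List Int))) : Nat → List (List Int) → PySem.Set (List Int) → PySem.Set (List Int)
  | 0, _, visited => visited
  | _+1, [], visited => visited
  | fuel+1, s :: rest, visited =>
    if visited.contains s then goB cf fuel rest visited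
    else goB cf fuel (cf.getD s [] ++ rest) (PySem.Set.add visited s)

def get_states_on_shortest_paths_to_state_alt (end_state : List Int) (came_from : List (List Int × List (List Int))) : List (List Int) :=
  goB (PySem.Dict.mk came_from) (1 + (came_from.map (fun kv => kv.2.length)).sum) [end_state] PySem.Set.empty

-- ===== PRECONDITION & SPEC =====
-- pvReach cf f s = the states reachable from s in 1..f steps along non-self came_from edges
-- (self-loop edges are harmless: A skips them, so they never drive its recursion).
def pvReach (cf : List (List Int × List (List Int))) : Nat → List Int → List (List Int)
  | 0, _ => []
  | f+1, s => (((PySem.Dict.mk cf).getD s []).filter (fun p => decide (p ≠ s))).flatMap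
      (fun p => p :: pvReach cf f p)

-- Pre_ excludes exactly the inputs on which A raises: those whose came_from graph has a cycle of
-- length ≥ 2 reachable from end_state (there A recurses forever — RecursionError).  A reachable
-- cycle always closes within came_from.length + 1 non-self steps.
def Pre_get_states_on_shortest_paths_to_state (end_state : List Int) (came_from : List (List Int × List (List Int))) : Prop :=
  ∀ k ∈ (end_state :: pvReach came_from (came_from.length + 1) end_state),
    k ∉ pvReach came_from (came_from.length + 1) k
instance (end_state : List Int) (came_from : List (List Int × List (List Int))) : Decidable (Pre_get_states_on_shortest_paths_to_state end_state came_from) := by unfold Pre_get_states_on_shortest_paths_to_state; infer_instance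

def pvWitness_get_states_on_shortest_paths_to_state : List Int × (List (List Int × List (List Int))) :=
  ([0], [([0], [[1], [2], [0]]), ([1], [[2]])])

-- Where A raises and B returns: on inputs whose came_from graph has a cycle of length ≥ 2
-- reachable from end_state, A raises RecursionError while B returns the set of reachable states.
def Raises_get_states_on_shortest_paths_to_state (end_state : List Int) (came_from : List (List Int × List (List Int))) : Prop :=
  ∃ k ∈ (end_state :: pvReach came_from (came_from.length + 1) end_state),
    ∃ p ∈ (PySem.Dict.mk came_from).getD k [],
      p ≠ k ∧ k ∈ p :: pvReach came_from came_from.length p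
instance (end_state : List Int) (came_from : List (List Int × List (List Int))) : Decidable (Raises_get_states_on_shortest_paths_to_state end_state came_from) := by unfold Raises_get_states_on_shortest_paths_to_state; infer_instance

def pvRaiseWitness_get_states_on_shortest_paths_to_state : List Int × (List (List Int × List (List Int))) :=
  ([0], [([0], [[1]]), ([1], [[0]])])
def pvRaiseWitnessOut_get_states_on_shortest_paths_to_state : List (List Int) := [[0], [1]]

def Spec_get_states_on_shortest_paths_to_state (end_state : List Int) (came_from : List (List Int × List (List Int))) (out : List (List Int)) : Prop := out = get_states_on_shortest_paths_to_state_alt end_state came_from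
instance (end_state : List Int) (came_from : List (List Int × List (List Int))) (out : List (List Int)) : Decidable (Spec_get_states_on_shortest_paths_to_state end_state came_from out) := by unfold Spec_get_states_on_shortest_paths_to_state; infer_instance

-- ===== CLAIM (what is proved, stated in full; the proofs are below) =====
def Claim_equal_get_states_on_shortest_paths_to_state : Prop := ∀ (end_state : List Int) (came_from : List (List Int × List (List Int))), Dom_get_states_on_shortest_paths_to_state end_state came_from → Pre_get_states_on_shortest_paths_to_state end_state came_from → Spec_get_states_on_shortest_paths_to_state end_state came_from (get_states_on_shortest_paths_to_state end_state came_from)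

def Claim_raises_get_states_on_shortest_paths_to_state : Prop := (∀ (end_state : List Int) (came_from : List (List Int × List (List Int))), Dom_get_states_on_shortest_paths_to_state end_state came_from → Raises_get_states_on_shortest_paths_to_state end_state came_from → ¬ Pre_get_states_on_shortest_paths_to_state end_state came_from) ∧ (Dom_get_states_on_shortest_paths_to_state (pvRaiseWitness_get_states_on_shortest_paths_to_state.1) (pvRaiseWitness_get_states_on_shortest_paths_to_state.2) ∧ Raises_get_states_on_shortest_paths_to_state (pvRaiseWitness_get_states_on_shortest_paths_to_state.1) (pvRaiseWitness_get_states_on_shortest_paths_to_state.2) ∧ get_states_on_shortest_paths_to_state_alt (pvRaiseWitness_get_states_on_shortest_paths_to_state.1) (pvRaiseWitness_get_states_on_shortest_paths_to_state.2) = pvRaiseWitnessOut_get_states_on_shortest_paths_to_state)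

-- ===== LEMMAS AND PROOFS =====

-- non-self edge relation of the came_from graph, and its reflexive-transitive closure
def pvE (cf : List (List Int × List (List Int))) (s p : List Int) : Prop :=
  p ∈ (PySem.Dict.mk cf).getD s [] ∧ p ≠ s
def pvR (cf : List (List Int × List (List Int))) : List Int → List Int → Prop :=
  Relation.ReflTransGen (pvE cf)

-- "a call at s with this much fuel can never hit the fuel-0 branch"
-- (self-loop predecessors never drive the recursion: they are already in the call's set)
def SafeF (cf : List (List Int × List (List Int))) : Nat → List Int → Prop
  | 0, _ => False
  | f+1, s => ∀ p ∈ (PySem.Dict.mk cf).getD s [], p ≠ s → SafeF cf f p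

theorem safeF_mono (cf : List (List Int × List (List Int))) :
    ∀ (f : Nat) (g : Nat) (s : List Int), SafeF cf f s → f ≤ g → SafeF cf g s := by
  intro f
  induction f with
  | zero => intro g s hs; exact hs.elim
  | succ f ih =>
    intro g s hs hg
    cases g with
    | zero => omega
    | succ g => exact fun p hp hne => ih g p (hs p hp hne) (by omega)

-- ---- Set algebra ----
theorem upd_single {α : Type} [BEq α] (V : PySem.Set α) (s : α) :
    PySem.Set.update V [s] = PySem.Set.add V s := by
  rw [PySem.Set.update_cons, PySem.Set.update_nil]

theorem upd_add {α : Type} [BEq α] [LawfulBEq α] (V : PySem.Set α) (X : PySem.Set α) (y : α) :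
    PySem.Set.update V (PySem.Set.add X y) = PySem.Set.add (PySem.Set.update V X) y := by
  by_cases hy : y ∈ X
  · rw [PySem.Set.add_of_mem hy, PySem.Set.add_of_mem ((PySem.Set.mem_update V X y).2 (Or.inr hy))]
  · rw [PySem.Set.add_of_not_mem hy, PySem.Set.update_append, upd_single]

theorem upd_assoc {α : Type} [BEq α] [LawfulBEq α] (V X : PySem.Set α) (Y : List α) :
    PySem.Set.update V (PySem.Set.update X Y) = PySem.Set.update (PySem.Set.update V X) Y := by
  induction Y generalizing X with
  | nil => rw [PySem.Set.update_nil, PySem.Set.update_nil]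
  | cons y Y ih =>
    rw [PySem.Set.update_cons, ih (PySem.Set.add X y), upd_add, PySem.Set.update_cons]

theorem upd_subset {α : Type} [BEq α] [LawfulBEq α] (S : PySem.Set α) (Y : List α)
    (h : ∀ y ∈ Y, y ∈ S) : PySem.Set.update S Y = S := by
  induction Y with
  | nil => exact PySem.Set.update_nil S
  | cons y Y ih =>
    rw [PySem.Set.update_cons, PySem.Set.add_of_mem (h y List.mem_cons_self)]
    exact ih fun z hz => h z (List.mem_cons_of_mem _ hz)

-- ---- pvReach ----
theorem pvReach_step (cf : List (List Int × List (List Int))) {s p : List Int} (f : Nat)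
    (hp : pvE cf s p) : p ∈ pvReach cf (f+1) s := by
  simp only [pvReach, List.mem_flatMap, List.mem_filter]
  exact ⟨p, ⟨hp.1, decide_eq_true hp.2⟩, List.mem_cons_self⟩

theorem pvReach_prepend (cf : List (List Int × List (List Int))) {s p x : List Int} {f : Nat}
    (hp : pvE cf s p) (hx : x ∈ pvReach cf f p) : x ∈ pvReach cf (f+1) s := by
  simp only [pvReach, List.mem_flatMap, List.mem_filter]
  exact ⟨p, ⟨hp.1, decide_eq_true hp.2⟩, List.mem_cons_of_mem _ hx⟩

theorem pvReach_succ_sub (cf : List (List Int × List (List Int))) :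
    ∀ (f : Nat) (s : List Int), pvReach cf f s ⊆ pvReach cf (f+1) s := by
  intro f
  induction f with
  | zero => intro s x hx; simp [pvReach] at hx
  | succ f ih =>
    intro s x hx
    simp only [pvReach, List.mem_flatMap, List.mem_filter, List.mem_cons] at hx
    obtain ⟨p, ⟨hp, hpne⟩, hxp⟩ := hx
    have hE : pvE cf s p := ⟨hp, of_decide_eq_true hpne⟩
    rcases hxp with h | h
    · exact h ▸ pvReach_step cf (f+1) hE
    · exact pvReach_prepend cf hE (ih p h)

theorem pvReach_mono (cf : List (List Int × List (List Int))) {f g : Nat} (hfg : f ≤ g) :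
    ∀ s, pvReach cf f s ⊆ pvReach cf g s := by
  induction hfg with
  | refl => exact fun s => List.Subset.refl _
  | step _ ih => exact fun s x hx => pvReach_succ_sub cf _ s (ih s hx)

theorem pvReach_ext (cf : List (List Int × List (List Int))) :
    ∀ (f : Nat) (a s p : List Int), s ∈ pvReach cf f a → pvE cf s p → p ∈ pvReach cf (f+1) a := by
  intro f
  induction f with
  | zero => intro a s p hs; simp [pvReach] at hs
  | succ f ih =>
    intro a s p hs hp
    simp only [pvReach, List.mem_flatMap, List.mem_filter, List.mem_cons] at hs
    obtain ⟨q, ⟨hq, hqne⟩, hsq⟩ := hs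
    have hE : pvE cf a q := ⟨hq, of_decide_eq_true hqne⟩
    rcases hsq with h | h
    · subst h; exact pvReach_prepend cf hE (pvReach_step cf f hp)
    · exact pvReach_prepend cf hE (ih q s p h hp)

theorem key_of_edge (cf : List (List Int × List (List Int))) {s p : List Int}
    (h : pvE cf s p) : s ∈ (PySem.Dict.mk cf).keys := by
  have h := h.1
  rw [PySem.Dict.getD_eq_get?_getD] at h
  cases hg : (PySem.Dict.mk cf).get? s with
  | none => rw [hg] at h; simp at h
  | some v =>
    have hc : (PySem.Dict.mk cf).contains s = true := by
      rw [PySem.Dict.contains_eq_isSome_get?, hg]; rfl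
    exact (PySem.Dict.contains_iff_mem_keys _ _).1 hc

theorem nodup_len_le {α : Type} [DecidableEq α] (l ks : List α) (h1 : l.Nodup)
    (h2 : ∀ a ∈ l, a ∈ ks) : l.length ≤ ks.length := by
  calc l.length = l.toFinset.card := (List.toFinset_card_of_nodup h1).symm
    _ ≤ ks.toFinset.card := Finset.card_le_card (fun a ha => List.mem_toFinset.2 (h2 a (List.mem_toFinset.1 ha)))
    _ ≤ ks.length := ks.toFinset_card_le

-- ---- termination depth bound from Pre_ ----
theorem safe_of_pre (end_state : List Int) (cf : List (List Int × List (List Int)))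
    (hpre : Pre_get_states_on_shortest_paths_to_state end_state cf) :
    ∀ (f : Nat) (s : List Int) (avoid : List (List Int)),
      avoid.Nodup → (∀ a ∈ avoid, a ∈ (PySem.Dict.mk cf).keys) →
      (∀ a ∈ avoid, s ∈ pvReach cf avoid.length a) →
      ((avoid = [] ∧ s = end_state) ∨ s ∈ pvReach cf avoid.length end_state) →
      cf.length + 1 ≤ f + avoid.length →
      SafeF cf f s := by
  intro f
  induction f with
  | zero =>
    intro s avoid hnd hkeys hreach hroot hfuel
    exfalso
    have hle : avoid.length ≤ cf.length := by
      have h := nodup_len_le avoid (PySem.Dict.mk cf).keys hnd hkeys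
      simpa [PySem.Dict.keys_mk] using h
    omega
  | succ f ih =>
    intro s avoid hnd hkeys hreach hroot hfuel p hp hpne
    have he : pvE cf s p := ⟨hp, hpne⟩
    have hle : avoid.length ≤ cf.length := by
      have h := nodup_len_le avoid (PySem.Dict.mk cf).keys hnd hkeys
      simpa [PySem.Dict.keys_mk] using h
    by_cases hs : s ∈ avoid
    · exfalso
      have h2 : s ∈ pvReach cf (cf.length+1) s :=
        pvReach_mono cf (by omega) s (hreach s hs)
      have hmem : s ∈ end_state :: pvReach cf (cf.length+1) end_state := by
        rcases hroot with ⟨_, rfl⟩ | hr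
        · exact List.mem_cons_self
        · exact List.mem_cons_of_mem _ (pvReach_mono cf (by omega) end_state hr)
      exact hpre s hmem h2
    · apply ih p (s :: avoid)
      · exact List.nodup_cons.2 ⟨hs, hnd⟩
      · intro a ha
        rcases List.mem_cons.1 ha with rfl | ha'
        · exact key_of_edge cf he
        · exact hkeys a ha'
      · intro a ha
        rcases List.mem_cons.1 ha with rfl | ha'
        · simpa using pvReach_step cf avoid.length he
        · simpa using pvReach_ext cf avoid.length a s p (hreach a ha') he
      · rcases hroot with ⟨hav, rfl⟩ | hr
        · subst hav
          exact Or.inr (by simpa using pvReach_step cf 0 he)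
        · exact Or.inr (by simpa using pvReach_ext cf avoid.length end_state s p hr he)
      · simp only [List.length_cons]
        omega

-- SafeF rules out any (non-self-edge) cycle among states reachable from s
theorem no_cycle (cf : List (List Int × List (List Int))) :
    ∀ (f : Nat) (s : List Int), SafeF cf f s →
      ∀ x, pvR cf s x → ¬ Relation.TransGen (pvE cf) x x := by
  intro f
  induction f with
  | zero => intro s hs; exact hs.elim
  | succ f ih =>
    intro s hs x hsx hT
    have hs' : ∀ p, pvE cf s p → SafeF cf f p := fun p hp => hs p hp.1 hp.2
    rcases Relation.ReflTransGen.cases_head hsx with heq | ⟨c, hc, hcx⟩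
    · subst heq
      obtain ⟨y, hy, hyx⟩ := (Relation.TransGen.head'_iff).1 hT
      exact ih y (hs' y hy) _ hyx hT
    · exact ih c (hs' c hc) x hcx hT

-- ---- properties of A's recursion ----
theorem goA_nodup (cf : PySem.Dict (List Int) (List (List Int))) :
    ∀ (f : Nat) (s : List Int), (goA cf f s).Nodup := by
  intro f
  induction f with
  | zero => intro s; exact PySem.Set.nodup_ofList _
  | succ f ih =>
    intro s
    simp only [goA]
    cases hg : cf.get? s with
    | none => exact PySem.Set.nodup_ofList _
    | some prevs =>
      have key : ∀ (ps : List (List Int)) (X : PySem.Set (List Int)), X.Nodup →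
          (ps.foldl (fun states p => if states.contains p then states
            else PySem.Set.update states (goA cf f p)) X).Nodup := by
        intro ps
        induction ps with
        | nil => intro X hX; exact hX
        | cons p ps ihp =>
          intro X hX
          simp only [List.foldl_cons]
          by_cases hc : X.contains p
          · rw [if_pos hc]; exact ihp X hX
          · rw [if_neg hc]; exact ihp _ (PySem.Set.nodup_update X _ hX)
      exact key prevs _ (PySem.Set.nodup_ofList _)

-- with enough fuel, A's recursion no longer depends on the exact fuel value
theorem goA_fuel (cf : List (List Int × List (List Int))) :
    ∀ (f g : Nat) (s : List Int), SafeF cf f s → f ≤ g →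
      goA (PySem.Dict.mk cf) g s = goA (PySem.Dict.mk cf) f s := by
  intro f
  induction f with
  | zero => intro g s hs; exact hs.elim
  | succ f ihf =>
    intro g s hs hfg
    cases g with
    | zero => omega
    | succ g =>
      have hsP : ∀ p ∈ (PySem.Dict.mk cf).getD s [], p ≠ s → SafeF cf f p := hs
      simp only [goA]
      cases hg : (PySem.Dict.mk cf).get? s with
      | none => rfl
      | some prevs =>
        have hgetD : (PySem.Dict.mk cf).getD s [] = prevs := by
          rw [PySem.Dict.getD_eq_get?_getD, hg]; rfl
        have key : ∀ (ps : List (List Int)) (X : PySem.Set (List Int)), s ∈ X →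
            (∀ p ∈ ps, p ∈ prevs) →
            ps.foldl (fun states p => if states.contains p then states
              else PySem.Set.update states (goA (PySem.Dict.mk cf) g p)) X
            = ps.foldl (fun states p => if states.contains p then states
              else PySem.Set.update states (goA (PySem.Dict.mk cf) f p)) X := by
          intro ps
          induction ps with
          | nil => intro X _ _; rfl
          | cons p ps ihp =>
            intro X hsX hps
            simp only [List.foldl_cons]
            by_cases hc : X.contains p
            · rw [if_pos hc, if_pos hc]
              exact ihp X hsX fun q hq => hps q (List.mem_cons_of_mem _ hq)
            · rw [if_neg hc, if_neg hc]
              have hpX : p ∉ X := fun h => hc (List.elem_eq_true_of_mem h)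
              have hpne : p ≠ s := fun h => hpX (h ▸ hsX)
              have hSp : SafeF cf f p := hsP p (hgetD ▸ hps p List.mem_cons_self) hpne
              rw [ihf g p hSp (by omega)]
              exact ihp _ ((PySem.Set.mem_update X _ s).2 (Or.inl hsX))
                fun q hq => hps q (List.mem_cons_of_mem _ hq)
        exact key prevs (PySem.Set.ofList [s]) (by simp [PySem.Set.mem_ofList]) (fun p hp => hp)

theorem goA_sound (cf : List (List Int × List (List Int))) :
    ∀ (f : Nat) (s x : List Int), x ∈ goA (PySem.Dict.mk cf) f s → pvR cf s x := by
  intro f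
  induction f with
  | zero =>
    intro s x hx
    have hx' : x = s := by simpa [goA, PySem.Set.mem_ofList] using hx
    subst hx'
    exact Relation.ReflTransGen.refl
  | succ f ih =>
    intro s x hx
    simp only [goA] at hx
    cases hg : (PySem.Dict.mk cf).get? s with
    | none =>
      rw [hg] at hx
      have hx' : x ∈ [s] := by simpa [PySem.Set.mem_ofList] using hx
      rcases List.mem_singleton.1 hx' with rfl
      exact Relation.ReflTransGen.refl
    | some prevs =>
      rw [hg] at hx
      have hgetD : (PySem.Dict.mk cf).getD s [] = prevs := by
        rw [PySem.Dict.getD_eq_get?_getD, hg]; rfl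
      have key : ∀ (ps : List (List Int)) (X : PySem.Set (List Int)),
          (∀ p ∈ ps, p ∈ prevs) → (∀ y ∈ X, pvR cf s y) → s ∈ X →
          ∀ y ∈ ps.foldl (fun states p => if states.contains p then states
            else PySem.Set.update states (goA (PySem.Dict.mk cf) f p)) X, pvR cf s y := by
        intro ps
        induction ps with
        | nil => intro X _ hX _ y hy; exact hX y hy
        | cons p ps ihp =>
          intro X hps hX hsX y hy
          simp only [List.foldl_cons] at hy
          by_cases hc : X.contains p
          · rw [if_pos hc] at hy
            exact ihp X (fun q hq => hps q (List.mem_cons_of_mem _ hq)) hX hsX y hy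
          · rw [if_neg hc] at hy
            have hpX : p ∉ X := fun h => hc (List.elem_eq_true_of_mem h)
            have hE : pvE cf s p := ⟨hgetD ▸ hps p List.mem_cons_self, fun h => hpX (h ▸ hsX)⟩
            refine ihp _ (fun q hq => hps q (List.mem_cons_of_mem _ hq)) ?_
              ((PySem.Set.mem_update X _ s).2 (Or.inl hsX)) y hy
            intro z hz
            rcases (PySem.Set.mem_update X _ z).1 hz with h | h
            · exact hX z h
            · exact Relation.ReflTransGen.head hE (ih p z h)
      refine key prevs _ (fun p hp => hp) ?_ (by simp [PySem.Set.mem_ofList]) x hx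
      intro y hy
      have hy' : y ∈ [s] := by simpa [PySem.Set.mem_ofList] using hy
      rcases List.mem_singleton.1 hy' with rfl
      exact Relation.ReflTransGen.refl

theorem goA_complete (cf : List (List Int × List (List Int))) :
    ∀ (f : Nat) (s : List Int), SafeF cf f s →
      ∀ t, pvR cf s t → t ∈ goA (PySem.Dict.mk cf) f s := by
  intro f
  induction f with
  | zero => intro s hs; exact hs.elim
  | succ f ih =>
    intro s hs t ht
    have hsP : ∀ p ∈ (PySem.Dict.mk cf).getD s [], p ≠ s → SafeF cf f p := hs
    simp only [goA]
    cases hg : (PySem.Dict.mk cf).get? s with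
    | none =>
      have hgetD : (PySem.Dict.mk cf).getD s [] = [] := by
        rw [PySem.Dict.getD_eq_get?_getD, hg]; rfl
      rcases Relation.ReflTransGen.cases_head ht with heq | ⟨c, hc, _⟩
      · subst heq; simp [PySem.Set.mem_ofList]
      · exfalso
        have hc' := hc.1
        rw [hgetD] at hc'
        simp at hc'
    | some prevs =>
      have hgetD : (PySem.Dict.mk cf).getD s [] = prevs := by
        rw [PySem.Dict.getD_eq_get?_getD, hg]; rfl
      have key : ∀ (ps : List (List Int)) (X : PySem.Set (List Int)),
          (∀ p ∈ ps, p ∈ prevs) →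
          (∀ q ∈ X, ∀ u, pvR cf q u → u ∈ X ∨ q = s) →
          s ∈ X →
          (∀ y ∈ X, y ∈ ps.foldl (fun states p => if states.contains p then states
            else PySem.Set.update states (goA (PySem.Dict.mk cf) f p)) X) ∧
          (∀ p ∈ ps, p ≠ s → ∀ u, pvR cf p u → u ∈ ps.foldl (fun states p => if states.contains p then states
            else PySem.Set.update states (goA (PySem.Dict.mk cf) f p)) X) := by
        intro ps
        induction ps with
        | nil =>
          intro X _ _ _
          exact ⟨fun y hy => hy, fun p hp => absurd hp List.not_mem_nil⟩
        | cons p ps ihp =>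
          intro X hps hXinv hsX
          simp only [List.foldl_cons]
          by_cases hc : X.contains p
          · rw [if_pos hc]
            have hpX : p ∈ X := List.mem_of_elem_eq_true hc
            obtain ⟨mono, compl⟩ := ihp X (fun q hq => hps q (List.mem_cons_of_mem _ hq)) hXinv hsX
            refine ⟨mono, ?_⟩
            intro q hq hqne u hu
            rcases List.mem_cons.1 hq with rfl | hq'
            · rcases hXinv q hpX u hu with h | h
              · exact mono u h
              · exact absurd h hqne
            · exact compl q hq' hqne u hu
          · rw [if_neg hc]
            have hpX : p ∉ X := fun h => hc (List.elem_eq_true_of_mem h)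
            have hpne : p ≠ s := fun h => hpX (h ▸ hsX)
            have hSp : SafeF cf f p := hsP p (hgetD ▸ hps p List.mem_cons_self) hpne
            have hX1inv : ∀ q ∈ PySem.Set.update X (goA (PySem.Dict.mk cf) f p),
                ∀ u, pvR cf q u → u ∈ PySem.Set.update X (goA (PySem.Dict.mk cf) f p) ∨ q = s := by
              intro q hq u hu
              rcases (PySem.Set.mem_update X _ q).1 hq with h | h
              · rcases hXinv q h u hu with h' | h'
                · exact Or.inl ((PySem.Set.mem_update X _ u).2 (Or.inl h'))
                · exact Or.inr h'
              · have hpq : pvR cf p q := goA_sound cf f p q h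
                have hmem : u ∈ goA (PySem.Dict.mk cf) f p :=
                  ih p hSp u (hpq.trans hu)
                exact Or.inl ((PySem.Set.mem_update X _ u).2 (Or.inr hmem))
            have hsX1 : s ∈ PySem.Set.update X (goA (PySem.Dict.mk cf) f p) :=
              (PySem.Set.mem_update X _ s).2 (Or.inl hsX)
            obtain ⟨mono, compl⟩ := ihp _ (fun q hq => hps q (List.mem_cons_of_mem _ hq)) hX1inv hsX1
            refine ⟨fun y hy => mono y ((PySem.Set.mem_update X _ y).2 (Or.inl hy)), ?_⟩
            intro q hq hqne u hu
            rcases List.mem_cons.1 hq with rfl | hq'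
            · exact mono u ((PySem.Set.mem_update X _ u).2
                (Or.inr (ih q hSp u hu)))
            · exact compl q hq' hqne u hu
      have hXinv0 : ∀ q ∈ PySem.Set.ofList [s], ∀ u, pvR cf q u → u ∈ PySem.Set.ofList [s] ∨ q = s := by
        intro q hq u _
        right
        have hq' : q ∈ [s] := by simpa [PySem.Set.mem_ofList] using hq
        exact List.mem_singleton.1 hq'
      have hsX0 : s ∈ PySem.Set.ofList [s] := by simp [PySem.Set.mem_ofList]
      obtain ⟨mono, compl⟩ := key prevs (PySem.Set.ofList [s])
        (fun p hp => hp) hXinv0 hsX0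
      rcases Relation.ReflTransGen.cases_head ht with heq | ⟨c, hc, hct⟩
      · subst heq; exact mono _ hsX0
      · exact compl c (hgetD ▸ hc.1) hc.2 t hct

-- ---- fuel accounting for B's stack machine ----
-- pvW cf V = total predecessor-list length over entries whose key is not yet visited
def pvW (cf : List (List Int × List (List Int))) (V : List (List Int)) : Nat :=
  ((cf.filter (fun kv => decide (kv.1 ∉ V))).map (fun kv => kv.2.length)).sum
def pvPhi (cf : List (List Int × List (List Int))) (stack : List (List Int)) (V : List (List Int)) : Nat :=
  stack.length + pvW cf V

theorem pvW_add_split (cf : List (List Int × List (List Int))) (V : PySem.Set (List Int))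
    (s : List Int) (hs : s ∉ V) :
    pvW cf V = pvW cf (PySem.Set.add V s)
      + ((cf.filter (fun kv => kv.1 == s)).map (fun kv => kv.2.length)).sum := by
  induction cf with
  | nil => rfl
  | cons kv cf ih =>
    simp only [pvW, List.filter_cons] at ih ⊢
    by_cases hks : kv.1 = s
    · have h1 : (decide (kv.1 ∉ V)) = true := by simp [hks, hs]
      have h2 : (decide (kv.1 ∉ PySem.Set.add V s)) = false := by
        simp [hks, PySem.Set.mem_add]
      have h3 : (kv.1 == s) = true := by simp [hks]
      simp only [h1, h2, h3, if_true, Bool.false_eq_true, if_false, List.map_cons, List.sum_cons]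
      omega
    · have h3 : (kv.1 == s) = false := by simp [hks]
      have h2 : (decide (kv.1 ∉ PySem.Set.add V s)) = (decide (kv.1 ∉ V)) := by
        by_cases hm : kv.1 ∈ V
        · simp [hm, PySem.Set.mem_add]
        · simp [hm, PySem.Set.mem_add, hks]
      by_cases hd : (decide (kv.1 ∉ V)) = true
      · simp only [h3, h2, hd, if_true, Bool.false_eq_true, if_false, List.map_cons, List.sum_cons]
        omega
      · simp only [h3, h2, eq_false_of_ne_true hd, Bool.false_eq_true, if_false]
        exact ih

theorem getD_le_keySum (cf : List (List Int × List (List Int))) (s : List Int) :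
    ((PySem.Dict.mk cf).getD s []).length
      ≤ ((cf.filter (fun kv => kv.1 == s)).map (fun kv => kv.2.length)).sum := by
  induction cf with
  | nil => simp [PySem.Dict.getD_eq_get?_getD]; rfl
  | cons kv cf ih =>
    rw [PySem.Dict.getD_eq_get?_getD]
    cases kv with
    | mk k v =>
      rw [PySem.Dict.get?_mk_cons]
      simp only [List.filter_cons]
      by_cases hks : (k == s) = true
      · simp only [hks, if_true, Option.getD_some, List.map_cons, List.sum_cons]
        omega
      · rw [if_neg hks, eq_false_of_ne_true hks]
        rw [← PySem.Dict.getD_eq_get?_getD]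
        exact ih

theorem phi_skip (cf : List (List Int × List (List Int))) (s : List Int)
    (rest : List (List Int)) (V : List (List Int)) :
    pvPhi cf rest V + 1 = pvPhi cf (s :: rest) V := by
  simp [pvPhi]; omega

theorem phi_expand (cf : List (List Int × List (List Int))) (s : List Int)
    (rest : List (List Int)) (V : PySem.Set (List Int)) (hs : s ∉ V) :
    pvPhi cf ((PySem.Dict.mk cf).getD s [] ++ rest) (PySem.Set.add V s) + 1
      ≤ pvPhi cf (s :: rest) V := by
  unfold pvPhi
  rw [List.length_append, List.length_cons, pvW_add_split cf V s hs]
  have := getD_le_keySum cf s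
  omega

theorem goB_nil (cf : PySem.Dict (List Int) (List (List Int))) :
    ∀ (f : Nat) (V : PySem.Set (List Int)), goB cf f [] V = V := by
  intro f V; cases f <;> rfl

theorem goB_fuel_irrel (cf : List (List Int × List (List Int))) :
    ∀ (f g : Nat) (stack : List (List Int)) (V : PySem.Set (List Int)),
      pvPhi cf stack V ≤ f → pvPhi cf stack V ≤ g →
      goB (PySem.Dict.mk cf) f stack V = goB (PySem.Dict.mk cf) g stack V := by
  intro f
  induction f with
  | zero =>
    intro g stack V hf _
    have : stack = [] := by
      cases stack with
      | nil => rfl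
      | cons s r => exfalso; simp [pvPhi] at hf
    subst this
    rw [goB_nil, goB_nil]
  | succ f ih =>
    intro g stack V hf hg
    cases stack with
    | nil => rw [goB_nil, goB_nil]
    | cons s rest =>
      cases g with
      | zero => exfalso; simp [pvPhi] at hg
      | succ g =>
        simp only [goB]
        by_cases hc : PySem.Set.contains V s = true
        · rw [if_pos hc, if_pos hc]
          exact ih g rest V (by rw [← phi_skip cf s] at hf; omega)
            (by rw [← phi_skip cf s] at hg; omega)
        · rw [if_neg hc, if_neg hc]
          have hsV : s ∉ V := fun h => hc ((PySem.Set.contains_iff V s).2 h)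
          have hphi := phi_expand cf s rest V hsV
          exact ih g _ _ (by omega) (by omega)

-- ---- main: B's stack machine equals "V updated with A's fresh-set recursion" ----
-- the body of A's loop over a predecessor list, as a named function (proof bookkeeping only)
def foldA (cf : PySem.Dict (List Int) (List (List Int))) (f : Nat)
    (ps : List (List Int)) (X : PySem.Set (List Int)) : PySem.Set (List Int) :=
  ps.foldl (fun states p => if states.contains p then states
    else PySem.Set.update states (goA cf f p)) X

theorem foldA_cons (cf : PySem.Dict (List Int) (List (List Int))) (f : Nat)
    (p : List Int) (ps : List (List Int)) (X : PySem.Set (List Int)) :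
    foldA cf f (p :: ps) X
      = foldA cf f ps (if X.contains p then X else PySem.Set.update X (goA cf f p)) := rfl

theorem goA_eq_foldA (cf : PySem.Dict (List Int) (List (List Int))) (f : Nat) (s : List Int)
    (prevs : List (List Int)) (hg : cf.get? s = some prevs) :
    goA cf (f + 1) s = foldA cf f prevs (PySem.Set.ofList [s]) := by
  simp only [goA, foldA]
  rw [hg]

theorem stack_eq (cf : List (List Int × List (List Int))) :
    ∀ (fR : Nat) (s : List Int) (V : PySem.Set (List Int)) (rest : List (List Int)) (fB fB' : Nat),
      SafeF cf fR s → fR ≤ cf.length + 1 →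
      (∀ q ∈ V, pvR cf s q → ∀ t, pvR cf q t → t ∈ V) →
      pvPhi cf (s :: rest) V ≤ fB →
      pvPhi cf rest (PySem.Set.update V (goA (PySem.Dict.mk cf) (cf.length + 1) s)) ≤ fB' →
      goB (PySem.Dict.mk cf) fB (s :: rest) V
        = goB (PySem.Dict.mk cf) fB' rest
            (PySem.Set.update V (goA (PySem.Dict.mk cf) (cf.length + 1) s)) := by
  intro fR
  induction fR with
  | zero => intro s V rest fB fB' hs; exact hs.elim
  | succ fR ih =>
    intro s V rest fB fB' hs hfr hV hfB hfB'
    have hsP : ∀ p ∈ (PySem.Dict.mk cf).getD s [], p ≠ s → SafeF cf fR p := hs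
    cases fB with
    | zero => exfalso; simp [pvPhi] at hfB
    | succ fB =>
      simp only [goB]
      by_cases hsV : s ∈ V
      · rw [if_pos ((PySem.Set.contains_iff V s).2 hsV)]
        have hres : PySem.Set.update V (goA (PySem.Dict.mk cf) (cf.length + 1) s) = V :=
          upd_subset _ _ (fun y hy =>
            hV s hsV Relation.ReflTransGen.refl y (goA_sound cf _ s y hy))
        rw [hres] at hfB' ⊢
        exact goB_fuel_irrel cf fB fB' rest V (by rw [← phi_skip cf s] at hfB; omega) hfB'
      · rw [if_neg (fun h => hsV ((PySem.Set.contains_iff V s).1 h))]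
        have hnc : ¬ Relation.TransGen (pvE cf) s s :=
          no_cycle cf (fR+1) s hs s Relation.ReflTransGen.refl
        have hfr' : fR ≤ cf.length := by omega
        cases hg : (PySem.Dict.mk cf).get? s with
        | none =>
          have hgetD : (PySem.Dict.mk cf).getD s [] = [] := by
            rw [PySem.Dict.getD_eq_get?_getD, hg]; rfl
          have hA : goA (PySem.Dict.mk cf) (cf.length + 1) s = PySem.Set.ofList [s] := by
            simp only [goA]; rw [hg]
          have hone : PySem.Set.update V (PySem.Set.ofList [s]) = PySem.Set.add V s := by
            rw [show PySem.Set.ofList [s] = [s] from rfl]; exact upd_single V s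
          rw [hA, hone] at hfB' ⊢
          rw [hgetD, List.nil_append]
          have hphi := phi_expand cf s rest V hsV
          rw [hgetD, List.nil_append] at hphi
          exact goB_fuel_irrel cf fB fB' rest _ (by omega) hfB'
        | some prevs =>
          have hgetD : (PySem.Dict.mk cf).getD s [] = prevs := by
            rw [PySem.Dict.getD_eq_get?_getD, hg]; rfl
          have hA : goA (PySem.Dict.mk cf) (cf.length + 1) s
              = foldA (PySem.Dict.mk cf) cf.length prevs (PySem.Set.ofList [s]) :=
            goA_eq_foldA (PySem.Dict.mk cf) cf.length s prevs hg
          have key : ∀ (ps : List (List Int)), ∀ (X : PySem.Set (List Int)) (fB₂ fB₃ : Nat),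
              (∀ p ∈ ps, p ∈ (PySem.Dict.mk cf).getD s []) →
              (∀ x ∈ X, pvR cf s x) →
              (∀ x ∈ X, x ≠ s → ∀ t, pvR cf x t → t ∈ X ∨ t ∈ V) →
              s ∈ X →
              pvPhi cf (ps ++ rest) (PySem.Set.update V X) ≤ fB₂ →
              pvPhi cf rest
                (PySem.Set.update V (foldA (PySem.Dict.mk cf) cf.length ps X)) ≤ fB₃ →
              goB (PySem.Dict.mk cf) fB₂ (ps ++ rest) (PySem.Set.update V X)
                = goB (PySem.Dict.mk cf) fB₃ rest
                    (PySem.Set.update V (foldA (PySem.Dict.mk cf) cf.length ps X)) := by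
            intro ps
            induction ps with
            | nil =>
              intro X fB₂ fB₃ _ _ _ _ hf2 hf3
              simp only [List.nil_append] at hf2 ⊢
              simp only [foldA, List.foldl_nil] at hf3 ⊢
              exact goB_fuel_irrel cf fB₂ fB₃ rest _ hf2 hf3
            | cons p ps ihp =>
              intro X fB₂ fB₃ hps hXs hXc hsX hf2 hf3
              have hpsrest : ((p :: ps) ++ rest) = p :: (ps ++ rest) := rfl
              have hptl : ∀ q ∈ ps, q ∈ (PySem.Dict.mk cf).getD s [] :=
                fun q hq => hps q (List.mem_cons_of_mem _ hq)
              rw [hpsrest] at hf2 ⊢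
              by_cases hpX : p ∈ X
              · -- already in the fresh set: both sides skip
                cases fB₂ with
                | zero => exfalso; simp [pvPhi] at hf2
                | succ fB₂ =>
                  simp only [goB]
                  rw [if_pos ((PySem.Set.contains_iff _ p).2
                    ((PySem.Set.mem_update V X p).2 (Or.inr hpX)))]
                  rw [foldA_cons, if_pos ((PySem.Set.contains_iff X p).2 hpX)] at hf3 ⊢
                  exact ihp X fB₂ fB₃ hptl hXs hXc hsX
                    (by rw [← phi_skip cf p] at hf2; omega) hf3
              · by_cases hpV : p ∈ V
                · -- already visited: B skips; A's extra exploration adds nothing new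
                  have hpne : p ≠ s := fun h => hsV (h ▸ hpV)
                  have hE : pvE cf s p := ⟨hps p List.mem_cons_self, hpne⟩
                  have hGp : ∀ y ∈ goA (PySem.Dict.mk cf) cf.length p, y ∈ V :=
                    fun y hy => hV p hpV (Relation.ReflTransGen.single hE) y
                      (goA_sound cf _ p y hy)
                  have hWX' : PySem.Set.update V
                      (PySem.Set.update X (goA (PySem.Dict.mk cf) cf.length p))
                      = PySem.Set.update V X := by
                    rw [upd_assoc]
                    exact upd_subset _ _ (fun t ht =>
                      (PySem.Set.mem_update V X t).2 (Or.inl (hGp t ht)))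
                  cases fB₂ with
                  | zero => exfalso; simp [pvPhi] at hf2
                  | succ fB₂ =>
                    simp only [goB]
                    rw [if_pos ((PySem.Set.contains_iff _ p).2
                      ((PySem.Set.mem_update V X p).2 (Or.inl hpV)))]
                    rw [foldA_cons,
                      if_neg (fun h => hpX ((PySem.Set.contains_iff X p).1 h))] at hf3 ⊢
                    rw [← hWX']
                    refine ihp (PySem.Set.update X (goA (PySem.Dict.mk cf) cf.length p))
                      fB₂ fB₃ hptl ?_ ?_
                      ((PySem.Set.mem_update X _ s).2 (Or.inl hsX)) ?_ hf3
                    · intro x hx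
                      rcases (PySem.Set.mem_update X _ x).1 hx with h | h
                      · exact hXs x h
                      · exact Relation.ReflTransGen.head hE (goA_sound cf _ p x h)
                    · intro x hx hxne t hxt
                      rcases (PySem.Set.mem_update X _ x).1 hx with h | h
                      · rcases hXc x h hxne t hxt with h' | h'
                        · exact Or.inl ((PySem.Set.mem_update X _ t).2 (Or.inl h'))
                        · exact Or.inr h'
                      · exact Or.inr (hV p hpV (Relation.ReflTransGen.single hE) t
                          ((goA_sound cf _ p x h).trans hxt))
                    · rw [hWX']
                      rw [← phi_skip cf p] at hf2
                      omega
                · -- new state: B expands it (outer induction), A recurses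
                  have hpne : p ≠ s := fun h => hpX (h ▸ hsX)
                  have hE : pvE cf s p := ⟨hps p List.mem_cons_self, hpne⟩
                  have hSp : SafeF cf fR p := hsP p (hps p List.mem_cons_self) hpne
                  have hVW : ∀ q ∈ PySem.Set.update V X, pvR cf p q →
                      ∀ t, pvR cf q t → t ∈ PySem.Set.update V X := by
                    intro q hq hpq t hqt
                    rcases (PySem.Set.mem_update V X q).1 hq with hqV | hqX
                    · exact (PySem.Set.mem_update V X t).2
                        (Or.inl (hV q hqV (Relation.ReflTransGen.head hE hpq) t hqt))
                    · by_cases hq_s : q = s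
                      · exact absurd (Relation.TransGen.head' hE (hq_s ▸ hpq)) hnc
                      · rcases hXc q hqX hq_s t hqt with h | h
                        · exact (PySem.Set.mem_update V X t).2 (Or.inr h)
                        · exact (PySem.Set.mem_update V X t).2 (Or.inl h)
                  have hAp : goA (PySem.Dict.mk cf) (cf.length + 1) p
                      = goA (PySem.Dict.mk cf) cf.length p := by
                    rw [goA_fuel cf fR (cf.length + 1) p hSp (by omega),
                      goA_fuel cf fR cf.length p hSp hfr']
                  have hW' : PySem.Set.update (PySem.Set.update V X)
                      (goA (PySem.Dict.mk cf) (cf.length + 1) p)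
                      = PySem.Set.update V
                        (PySem.Set.update X (goA (PySem.Dict.mk cf) cf.length p)) := by
                    rw [hAp, upd_assoc]
                  rw [ih p (PySem.Set.update V X) (ps ++ rest) fB₂
                    (pvPhi cf (ps ++ rest) (PySem.Set.update V
                      (PySem.Set.update X (goA (PySem.Dict.mk cf) cf.length p))))
                    hSp (by omega) hVW hf2
                    (by rw [hW'])]
                  rw [hW']
                  rw [foldA_cons,
                    if_neg (fun h => hpX ((PySem.Set.contains_iff X p).1 h))] at hf3 ⊢
                  refine ihp (PySem.Set.update X (goA (PySem.Dict.mk cf) cf.length p))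
                    _ fB₃ hptl ?_ ?_
                    ((PySem.Set.mem_update X _ s).2 (Or.inl hsX)) (le_refl _) hf3
                  · intro x hx
                    rcases (PySem.Set.mem_update X _ x).1 hx with h | h
                    · exact hXs x h
                    · exact Relation.ReflTransGen.head hE (goA_sound cf _ p x h)
                  · intro x hx hxne t hxt
                    rcases (PySem.Set.mem_update X _ x).1 hx with h | h
                    · rcases hXc x h hxne t hxt with h' | h'
                      · exact Or.inl ((PySem.Set.mem_update X _ t).2 (Or.inl h'))
                      · exact Or.inr h'
                    · refine Or.inl ((PySem.Set.mem_update X _ t).2 (Or.inr ?_))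
                      exact goA_complete cf cf.length p (safeF_mono cf fR cf.length p hSp hfr')
                        t ((goA_sound cf _ p x h).trans hxt)
          have hone : PySem.Set.update V (PySem.Set.ofList [s]) = PySem.Set.add V s := by
            rw [show PySem.Set.ofList [s] = [s] from rfl]; exact upd_single V s
          rw [hA] at hfB' ⊢
          rw [hgetD, ← hone]
          exact key prevs (PySem.Set.ofList [s]) fB fB'
            (fun p hp => hgetD ▸ hp)
            (by intro x hx
                have hx' : x ∈ [s] := by simpa [PySem.Set.mem_ofList] using hx
                rcases List.mem_singleton.1 hx' with rfl
                exact Relation.ReflTransGen.refl)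
            (by intro x hx hxne
                have hx' : x ∈ [s] := by simpa [PySem.Set.mem_ofList] using hx
                exact absurd (List.mem_singleton.1 hx') hxne)
            (by simp [PySem.Set.mem_ofList])
            (by rw [hone]
                have hphi := phi_expand cf s rest V hsV
                rw [hgetD] at hphi; omega)
            hfB'

-- ===== VERDICT (by name: the statement is the Claim_ definition above) =====
theorem get_states_on_shortest_paths_to_state_spec : Claim_equal_get_states_on_shortest_paths_to_state := by
  intro end_state came_from _ hpre
  unfold Spec_get_states_on_shortest_paths_to_state
  unfold get_states_on_shortest_paths_to_state get_states_on_shortest_paths_to_state_alt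
  have hsafe : SafeF came_from (came_from.length + 1) end_state :=
    safe_of_pre end_state came_from hpre (came_from.length + 1) end_state []
      List.nodup_nil (fun a ha => absurd ha List.not_mem_nil)
      (fun a ha => absurd ha List.not_mem_nil) (Or.inl ⟨rfl, rfl⟩) (by omega)
  have hW0 : pvW came_from [] = (came_from.map (fun kv => kv.2.length)).sum := by
    unfold pvW
    rw [List.filter_eq_self.mpr (fun kv _ => by simp)]
  have hmain := stack_eq came_from (came_from.length + 1) end_state PySem.Set.empty []
    (1 + (came_from.map (fun kv => kv.2.length)).sum)
    (pvPhi came_from []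
      (PySem.Set.update PySem.Set.empty
        (goA (PySem.Dict.mk came_from) (came_from.length + 1) end_state)))
    hsafe (le_refl _) (fun q hq => absurd hq List.not_mem_nil)
    (by simp [pvPhi, hW0, PySem.Set.empty])
    (le_refl _)
  rw [hmain, goB_nil, PySem.Set.update_empty,
    PySem.Set.ofList_eq_self_of_nodup _ (goA_nodup (PySem.Dict.mk came_from) _ end_state)]

theorem get_states_on_shortest_paths_to_state_raises : Claim_raises_get_states_on_shortest_paths_to_state := by
  unfold Claim_raises_get_states_on_shortest_paths_to_state
  refine ⟨?_, by decide, by decide, by decide⟩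
  intro end_state came_from _ hr hpre
  obtain ⟨k, hk, p, hp, hne, hcyc⟩ := hr
  apply hpre k hk
  rcases List.mem_cons.1 hcyc with heq | hmem
  · exact absurd heq.symm hne
  · exact pvReach_prepend came_from (show pvE came_from k p from ⟨hp, hne⟩) hmem

-- self-check: the literal witness value pinned in Claim_raises_… is exactly B's output there
theorem get_states_on_shortest_paths_to_state_raises_witness :
    get_states_on_shortest_paths_to_state_alt
      pvRaiseWitness_get_states_on_shortest_paths_to_state.1
      pvRaiseWitness_get_states_on_shortest_paths_to_state.2
      = pvRaiseWitnessOut_get_states_on_shortest_paths_to_state :=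
  get_states_on_shortest_paths_to_state_raises.2.2.2
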